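-- pv_equiv track=rewrite | github.com/Y-SHI-MxLucid/nucAnno | nucAnno/roiconvertor.py | assignColors
-- ===== SOURCE A (Python) =====
-- def assignColors(nameList, colorPal):
--     colorNum = len(colorPal)
--     grpIdx = 0
--     colorList = []
--     nameCache = ''
--     for name in nameList:
--         prefix = name[0:(name[name.find('-') + 1:].find('-') + name.find('-') + 1)]
--         if prefix != nameCache:
--             grpIdx = grpIdx + 1
--             nameCache = prefix
--             colorList.append(colorPal[grpIdx % colorNum])
--         else:
--             colorList.append(colorPal[grpIdx % colorNum])
--     return colorList
-- ===== SOURCE B (Python) =====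
-- def assignColors(nameList, colorPal):
--     # Pass 1: run-length encode consecutive equal prefixes; Pass 2: one color
--     # per run (with A's initial-cache rule), repeated run-length times.
--     def prefix(name):
--         j = name.find('-')
--         return name[0:(name[j + 1:].find('-') + j + 1)]
--     runs = []
--     for name in nameList:
--         p = prefix(name)
--         if runs and runs[-1][0] == p:
--             runs[-1][1] += 1
--         else:
--             runs.append([p, 1])
--     colorList = []
--     grpIdx = 0
--     nameCache = ''
--     for p, cnt in runs:
--         if p != nameCache:
--             grpIdx += 1
--             nameCache = p
--         colorList += [colorPal[grpIdx % len(colorPal)]] * cnt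
--     return colorList
-- ===== Notes on version B (the rewrite author's own statement) =====
-- stated objective: alternative
-- what changed: B first run-length-encodes the list of prefixes into (prefix, count) runs, then emits one palette color per run repeated count times, instead of A's single per-element change-detection loop; Pre_ only excludes the ZeroDivisionError case (nonempty nameList with empty colorPal), where both raise.
import Mathlib
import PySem

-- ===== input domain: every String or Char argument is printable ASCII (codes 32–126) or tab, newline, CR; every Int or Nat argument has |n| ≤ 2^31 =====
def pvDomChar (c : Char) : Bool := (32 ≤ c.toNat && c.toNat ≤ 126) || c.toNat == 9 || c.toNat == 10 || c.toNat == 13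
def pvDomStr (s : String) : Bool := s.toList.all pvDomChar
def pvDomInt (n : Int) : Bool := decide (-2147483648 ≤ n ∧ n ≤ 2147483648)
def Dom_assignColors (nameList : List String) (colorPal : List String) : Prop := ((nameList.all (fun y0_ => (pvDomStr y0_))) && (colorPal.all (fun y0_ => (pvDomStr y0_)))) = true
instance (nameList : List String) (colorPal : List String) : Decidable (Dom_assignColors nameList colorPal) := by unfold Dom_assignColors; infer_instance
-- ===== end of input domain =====

-- B replaces A's per-element change-detection loop by run-length encoding the prefixes
-- and emitting one color per run repeated count times (objective: alternative decomposition).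


-- ===== PORT A =====
-- name[0:(name[name.find('-') + 1:].find('-') + name.find('-') + 1)] as a List Char
-- (both Python versions compute this exact expression; B's nested helper `prefix`)
def pvPrefix (name : String) : List Char :=
  let cs := name.toList
  let j := PySem.Chars.find cs ['-']
  PySem.List.slice cs (some 0)
    (some (PySem.Chars.find (PySem.List.slice cs (some (j + 1)) none) ['-'] + j + 1))

-- colorPal[g % colorNum]; default "" is only reached when colorPal = [], excluded by Pre_
def pvColor (colorPal : List String) (g : Int) : String :=
  PySem.List.pyGetD colorPal (PySem.Int.mod g (colorPal.length : Int)) ""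

def assignColors (nameList : List String) (colorPal : List String) : List String :=
  let st := nameList.foldl
    (fun (st : Int × List String × List Char) name =>
      let grpIdx := st.1
      let colorList := st.2.1
      let nameCache := st.2.2
      let pfx := pvPrefix name
      if pfx ≠ nameCache then
        (grpIdx + 1, colorList ++ [pvColor colorPal (grpIdx + 1)], pfx)
      else
        (grpIdx, colorList ++ [pvColor colorPal grpIdx], nameCache))
    (0, [], [])
  st.2.1

-- ===== PORT B =====
-- one step of the run-length encoding loop (runs[-1] bump or append of a new run)
def pvRleStep (runs : List (List Char × Nat)) (p : List Char) : List (List Char × Nat) :=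
  match runs.getLast? with
  | some (q, c) => if q = p then runs.dropLast ++ [(q, c + 1)] else runs ++ [(p, 1)]
  | none => [(p, 1)]

-- second loop of B: one color per run, repeated run-length times
def pvEmitRuns (colorPal : List String) : Int → List Char → List (List Char × Nat) → List String
  | _, _, [] => []
  | g, cache, (p, cnt) :: rest =>
    let g' := if p ≠ cache then g + 1 else g
    let c' := if p ≠ cache then p else cache
    List.replicate cnt (pvColor colorPal g') ++ pvEmitRuns colorPal g' c' rest

def assignColors_alt (nameList : List String) (colorPal : List String) : List String :=
  let runs := nameList.foldl (fun runs name => pvRleStep runs (pvPrefix name)) []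
  pvEmitRuns colorPal 0 [] runs

-- ===== PRECONDITION & SPEC =====
-- Pre_ excludes exactly the inputs where Python A raises ZeroDivisionError
-- (grpIdx % len(colorPal) with an empty palette and a nonempty nameList); B raises there too.
def Pre_assignColors (nameList : List String) (colorPal : List String) : Prop :=
  nameList = [] ∨ colorPal ≠ []
instance (nameList : List String) (colorPal : List String) : Decidable (Pre_assignColors nameList colorPal) := by unfold Pre_assignColors; infer_instance

def pvWitness_assignColors : List String × List String :=
  (["a-b-1", "a-b-2", "c-d-1"], ["red", "green"])

def Spec_assignColors (nameList : List String) (colorPal : List String) (out : List String) : Prop := out = assignColors_alt nameList colorPal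
instance (nameList : List String) (colorPal : List String) (out : List String) : Decidable (Spec_assignColors nameList colorPal out) := by unfold Spec_assignColors; infer_instance

-- ===== CLAIM (what is proved, stated in full; the proofs are below) =====
def Claim_equal_assignColors : Prop := ∀ (nameList : List String) (colorPal : List String), Dom_assignColors nameList colorPal → Pre_assignColors nameList colorPal → Spec_assignColors nameList colorPal (assignColors nameList colorPal)

-- ===== LEMMAS AND PROOFS =====

-- A's loop over the list of prefixes, as a plain structural recursion (proof helper)
def pvARun (colorPal : List String) : List (List Char) → Int → List Char → List String
  | [], _, _ => []
  | p :: l, g, c =>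
    if p ≠ c then pvColor colorPal (g + 1) :: pvARun colorPal l (g + 1) p
    else pvColor colorPal g :: pvARun colorPal l g c

theorem pvAFold_eq (colorPal : List String) :
    ∀ (l : List String) (g : Int) (acc : List String) (c : List Char),
    (l.foldl (fun (st : Int × List String × List Char) name =>
      let grpIdx := st.1
      let colorList := st.2.1
      let nameCache := st.2.2
      let pfx := pvPrefix name
      if pfx ≠ nameCache then
        (grpIdx + 1, colorList ++ [pvColor colorPal (grpIdx + 1)], pfx)
      else
        (grpIdx, colorList ++ [pvColor colorPal grpIdx], nameCache))
      (g, acc, c)).2.1 = acc ++ pvARun colorPal (l.map pvPrefix) g c := by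
  intro l
  induction l with
  | nil => intro g acc c; simp [pvARun]
  | cons n l ih =>
    intro g acc c
    by_cases h : pvPrefix n ≠ c
    · simp only [List.foldl_cons, List.map_cons, pvARun, if_pos h]
      rw [ih]; simp
    · simp only [List.foldl_cons, List.map_cons, pvARun, h]
      rw [ih]; simp

theorem pvRleStep_append (rs ys : List (List Char × Nat)) (p : List Char) (hys : ys ≠ []) :
    pvRleStep (rs ++ ys) p = rs ++ pvRleStep ys p := by
  rcases List.eq_nil_or_concat ys with rfl | ⟨zs, x, rfl⟩
  · exact absurd rfl hys
  · obtain ⟨q, c⟩ := x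
    simp only [pvRleStep, List.concat_eq_append, ← List.append_assoc, List.getLast?_concat,
      List.dropLast_concat]
    split_ifs <;> simp

theorem pvRleStep_ne_nil (ys : List (List Char × Nat)) (p : List Char) :
    pvRleStep ys p ≠ [] := by
  unfold pvRleStep
  cases h : ys.getLast? with
  | none => simp
  | some x => obtain ⟨q, c⟩ := x; dsimp only; split_ifs <;> simp

theorem pvFoldRle_append (l : List (List Char)) :
    ∀ (rs ys : List (List Char × Nat)), ys ≠ [] →
    l.foldl pvRleStep (rs ++ ys) = rs ++ l.foldl pvRleStep ys := by
  induction l with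
  | nil => intro rs ys _; simp
  | cons p l ih =>
    intro rs ys hys
    simp only [List.foldl_cons]
    rw [pvRleStep_append rs ys p hys, ih rs _ (pvRleStep_ne_nil ys p)]

theorem pvMain (colorPal : List String) :
    ∀ (l : List (List Char)) (p : List Char) (k : Nat) (g : Int) (c : List Char),
    pvEmitRuns colorPal g c (l.foldl pvRleStep [(p, k)]) =
      List.replicate k (pvColor colorPal (if p ≠ c then g + 1 else g)) ++
        pvARun colorPal l (if p ≠ c then g + 1 else g) p := by
  intro l
  induction l with
  | nil =>
    intro p k g c
    simp [pvEmitRuns, pvARun]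
  | cons a l ih =>
    intro p k g c
    simp only [List.foldl_cons]
    by_cases hap : p = a
    · subst hap
      have hstep : pvRleStep [(p, k)] p = [(p, k + 1)] := by
        simp [pvRleStep]
      rw [hstep, ih p (k + 1) g c]
      simp only [pvARun, ne_eq, not_true_eq_false]
      rw [List.replicate_succ']
      simp
    · have hstep : pvRleStep [(p, k)] a = [(p, k)] ++ [(a, 1)] := by
        simp [pvRleStep, Ne.symm, hap]
      rw [hstep, pvFoldRle_append l [(p, k)] [(a, 1)] (by simp)]
      simp only [List.cons_append, List.nil_append, pvEmitRuns]
      have hc : (if p ≠ c then p else c) = p := by by_cases h : p = c <;> simp [h]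
      rw [hc, ih a 1 (if p ≠ c then g + 1 else g) p]
      have hne : a ≠ p := fun h => hap h.symm
      simp [pvARun, hne]

-- ===== VERDICT (by name: the statement is the Claim_ definition above) =====
theorem assignColors_spec : Claim_equal_assignColors := by
  intro nameList colorPal _ _
  unfold Spec_assignColors assignColors assignColors_alt
  rw [pvAFold_eq colorPal nameList 0 [] [], List.nil_append]
  show pvARun colorPal (nameList.map pvPrefix) 0 [] =
    pvEmitRuns colorPal 0 []
      (List.foldl (fun runs name => pvRleStep runs (pvPrefix name)) [] nameList)
  rw [← List.foldl_map]
  cases h : nameList.map pvPrefix with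
  | nil => simp [pvARun, pvEmitRuns]
  | cons p l =>
    simp only [List.foldl_cons]
    have hstep : pvRleStep [] p = [(p, 1)] := by simp [pvRleStep]
    rw [hstep, pvMain colorPal l p 1 0 []]
    by_cases hp : p = ([] : List Char) <;> simp [pvARun, hp, List.replicate]
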